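-- pv_equiv track=rewrite | github.com/Thilaksan8/AI_labs | Lab1/Q2.py | closestPairSum
-- ===== SOURCE A (Python) =====
-- def closestPairSum(arr):
--     arr.sort()
--     min_diff = float('inf')
--     max_abs_sum = 0
--
--     for i in range(len(arr) - 1):
--         diff = abs(arr[i] - arr[i+1])
--         abs_sum = abs(arr[i]) + abs(arr[i+1])
--
--         if diff < min_diff:
--             min_diff = diff
--             max_abs_sum = abs_sum
--         elif diff == min_diff:
--             max_abs_sum = max(max_abs_sum, abs_sum)
--
--     return max_abs_sum
-- ===== SOURCE B (Python) =====
-- def closestPairSum(arr):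
--     arr.sort()
--     best = {}
--     for a, b in zip(arr, arr[1:]):
--         d = abs(a - b)
--         s = abs(a) + abs(b)
--         if d not in best or s > best[d]:
--             best[d] = s
--     return best[min(best)] if best else 0
-- ===== Notes on version B (the rewrite author's own statement) =====
-- stated objective: alternative
-- what changed: A's fused scan tracking the running min_diff and max_abs_sum with branching is replaced by building a dict grouping each adjacent difference to its best abs-sum, then looking up the smallest key; no running-minimum or tie branches remain.
import Mathlib
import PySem

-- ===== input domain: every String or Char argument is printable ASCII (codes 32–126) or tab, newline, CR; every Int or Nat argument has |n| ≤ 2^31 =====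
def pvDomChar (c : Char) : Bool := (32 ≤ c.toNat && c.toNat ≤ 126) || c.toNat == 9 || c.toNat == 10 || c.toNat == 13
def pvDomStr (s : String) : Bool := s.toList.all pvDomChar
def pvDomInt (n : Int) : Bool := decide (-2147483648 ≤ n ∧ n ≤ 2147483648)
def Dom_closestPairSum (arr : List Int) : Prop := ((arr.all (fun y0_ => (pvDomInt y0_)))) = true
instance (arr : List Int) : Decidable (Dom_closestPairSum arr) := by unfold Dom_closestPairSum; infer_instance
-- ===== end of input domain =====

-- B replaces A's fused scan (running min_diff and tie-breaking max_abs_sum) by a dict that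
-- groups each adjacent difference to its best abs-sum, then looks up the smallest key
-- (objective: alternative). Both A and B sort the argument list in place; the equivalence
-- proved here is about the RETURN value only (B performs the same mutation).

-- ===== PORT A =====
-- tiny helpers naming the two expressions computed on an adjacent pair
def pairDiff (p : Int × Int) : Int := |p.1 - p.2|
def pairAbsSum (p : Int × Int) : Int := |p.1| + |p.2|

-- A's loop step: state is (min_diff, max_abs_sum); `none` plays float('inf')
-- (any diff satisfies `diff < inf`, so the first pair always takes the first branch).
def aStep (acc : Option Int × Int) (p : Int × Int) : Option Int × Int :=
  let diff := pairDiff p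
  let absSum := pairAbsSum p
  match acc.1 with
  | none => (some diff, absSum)
  | some m =>
    if diff < m then (some diff, absSum)
    else if diff = m then (some m, max acc.2 absSum)
    else acc

def closestPairSum (arr : List Int) : Int :=
  let s := PySem.List.sorted arr id false
  let st := (PySem.List.pyRange 0 ((s.length : Int) - 1) 1).foldl
    (fun acc i => aStep acc (PySem.List.pyGetD s i 0, PySem.List.pyGetD s (i + 1) 0))
    (none, 0)
  st.2

-- ===== PORT B =====
-- 'if d not in best or s > best[d]: best[d] = s'
def bStep (best : PySem.Dict Int Int) (p : Int × Int) : PySem.Dict Int Int :=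
  let d := pairDiff p
  let s := pairAbsSum p
  match best.get? d with
  | none => best.insert d s
  | some v => if v < s then best.insert d s else best

def closestPairSum_alt (arr : List Int) : Int :=
  let s := PySem.List.sorted arr id false
  let best := (s.zip (s.drop 1)).foldl bStep PySem.Dict.empty
  -- 'best[min(best)] if best else 0' : min(best) iterates the keys
  match PySem.List.min? best.keys (fun k => k) with
  | none => 0
  | some m => best.getD m 0

-- ===== PRECONDITION & SPEC =====
def Spec_closestPairSum (arr : List Int) (out : Int) : Prop := out = closestPairSum_alt arr
instance (arr : List Int) (out : Int) : Decidable (Spec_closestPairSum arr out) := by unfold Spec_closestPairSum; infer_instance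

-- ===== CLAIM (what is proved, stated in full; the proofs are below) =====
def Claim_equal_closestPairSum : Prop := ∀ (arr : List Int), Dom_closestPairSum arr → Spec_closestPairSum arr (closestPairSum arr)

-- ===== LEMMAS AND PROOFS =====

-- the adjacent indexing of A, viewed over the sorted list s, enumerates exactly s.zip s.tail
lemma map_range_pairs (s : List Int) :
    (PySem.List.pyRange 0 ((s.length : Int) - 1) 1).map
      (fun i => (PySem.List.pyGetD s i 0, PySem.List.pyGetD s (i + 1) 0))
      = s.zip s.tail := by
  apply List.ext_getElem
  · simp [PySem.List.length_pyRange_one, List.length_zip, List.length_tail]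
  · intro k h1 h2
    have hk : k < s.length - 1 := by
      simpa [List.length_zip, List.length_tail] using h2
    have hkr : (PySem.List.pyRange 0 ((s.length : Int) - 1) 1)[k]'(by
        simpa [PySem.List.length_pyRange_one] using h1) = (k : Int) := by
      rw [PySem.List.getElem_pyRange_one]; ring
    simp only [List.getElem_map, hkr]
    have e1 : PySem.List.pyGetD s (k : Int) 0 = s[k]'(by omega) := by
      rw [PySem.List.pyGetD_eq_getElem s 0 (by exact_mod_cast Nat.zero_le k)
        (by exact_mod_cast (by omega : k < s.length))]
      simp
    have e2 : PySem.List.pyGetD s ((k : Int) + 1) 0 = s[k + 1]'(by omega) := by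
      rw [show ((k : Int) + 1) = ((k + 1 : Nat) : Int) by push_cast; ring,
        PySem.List.pyGetD_eq_getElem s 0 (by exact_mod_cast Nat.zero_le (k + 1))
        (by exact_mod_cast (by omega : k + 1 < s.length))]
      simp
    rw [List.getElem_zip]
    simp [e1, e2, List.getElem_tail]

-- characterisation of A's fused loop on a nonempty pair list
lemma loop_char (L : List (Int × Int)) (hL : L ≠ []) :
    L.foldl aStep (none, 0) =
      (some (((L.map pairDiff).min?).getD 0),
       (((L.filter (fun p => pairDiff p == ((L.map pairDiff).min?).getD 0)).map pairAbsSum).max?).getD 0) := by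
  induction L using List.reverseRecOn with
  | nil => simp at hL
  | append_singleton L p ih =>
    cases L with
    | nil => simp [aStep]
    | cons q L' =>
      set L := q :: L' with hLdef
      obtain ⟨m, hm⟩ : ∃ m, (L.map pairDiff).min? = some m := ⟨_, List.min?_cons'⟩
      have hmem : m ∈ L.map pairDiff ∧ ∀ b ∈ L.map pairDiff, m ≤ b :=
        List.min?_eq_some_iff.mp hm
      have ihv := ih (by simp [hLdef])
      rw [List.foldl_append, ihv, hm]
      simp only [Option.getD_some, List.foldl_cons, List.foldl_nil]
      have hmin' : ((L ++ [p]).map pairDiff).min? = some (min m (pairDiff p)) := by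
        rw [List.map_append, List.map_singleton]
        obtain ⟨x, xs, hx⟩ : ∃ x xs, L.map pairDiff = x :: xs := by
          cases hLx : L.map pairDiff with
          | nil => simp [hLdef] at hLx
          | cons x xs => exact ⟨x, xs, rfl⟩
        rw [hx, List.cons_append, List.min?_cons', List.foldl_append]
        rw [hx, List.min?_cons'] at hm
        simp only [List.foldl_cons, List.foldl_nil, Option.some.injEq] at hm ⊢
        rw [hm]
      rcases lt_trichotomy (pairDiff p) m with hlt | heq | hgt
      · -- strictly smaller: p alone attains the new minimum
        have hminv : min m (pairDiff p) = pairDiff p := by omega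
        rw [hmin', Option.getD_some, hminv]
        have hfilL : L.filter (fun q' => pairDiff q' == pairDiff p) = [] := by
          rw [List.filter_eq_nil_iff]
          intro a ha
          have := hmem.2 (pairDiff a) (List.mem_map_of_mem ha)
          simp only [beq_iff_eq]
          omega
        simp [aStep, List.filter_append, hfilL, hlt]
      · -- tie: both the old attainers and p qualify
        have hminv : min m (pairDiff p) = m := by omega
        rw [hmin', Option.getD_some, hminv]
        have hfil : (L ++ [p]).filter (fun q' => pairDiff q' == m) =
            L.filter (fun q' => pairDiff q' == m) ++ [p] := by
          rw [List.filter_append]; simp [heq]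
        rw [hfil]
        obtain ⟨a, ha, haeq⟩ : ∃ a ∈ L, pairDiff a = m := by
          obtain ⟨a, ha, haeq⟩ := List.mem_map.mp hmem.1
          exact ⟨a, ha, haeq⟩
        obtain ⟨y, ys, hy⟩ : ∃ y ys, L.filter (fun q' => pairDiff q' == m) = y :: ys := by
          cases hLy : L.filter (fun q' => pairDiff q' == m) with
          | nil =>
            exfalso
            have : a ∈ L.filter (fun q' => pairDiff q' == m) := by
              rw [List.mem_filter]; exact ⟨ha, by simp [haeq]⟩
            rw [hLy] at this; simp at this
          | cons y ys => exact ⟨y, ys, rfl⟩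
        rw [hy]
        simp only [List.map_cons, List.map_append,
          List.cons_append, List.max?_cons', List.foldl_append, Option.getD_some]
        simp [aStep, heq]
      · -- larger: nothing changes
        have hminv : min m (pairDiff p) = m := by omega
        rw [hmin', Option.getD_some, hminv]
        have hfil : (L ++ [p]).filter (fun q' => pairDiff q' == m) =
            L.filter (fun q' => pairDiff q' == m) := by
          rw [List.filter_append]
          simp [show ¬ (pairDiff p = m) by omega]
        rw [hfil]
        simp [aStep, show ¬ pairDiff p < m by omega, show ¬ pairDiff p = m by omega]

-- max? of a list with one element appended
lemma max?_append_singleton (xs : List Int) (a : Int) :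
    (xs ++ [a]).max? = some (match xs.max? with | none => a | some v => max v a) := by
  cases xs with
  | nil => simp
  | cons x t =>
    rw [List.cons_append, List.max?_cons', List.foldl_append, List.max?_cons']
    simp

-- B's dict after the loop: lookup at k is the max abs-sum among pairs whose diff is k
lemma dict_char (L : List (Int × Int)) (k : Int) :
    (L.foldl bStep PySem.Dict.empty).get? k
      = ((L.filter (fun p => pairDiff p == k)).map pairAbsSum).max? := by
  induction L using List.reverseRecOn with
  | nil => simp [PySem.Dict.get?_empty]
  | append_singleton L p ih =>
    rw [List.foldl_append, List.foldl_cons, List.foldl_nil, List.filter_append]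
    set D := L.foldl bStep PySem.Dict.empty with hDdef
    by_cases hk : pairDiff p = k
    · have hfil : List.filter (fun q => pairDiff q == k) [p] = [p] := by simp [hk]
      rw [hfil, List.map_append, List.map_singleton, max?_append_singleton, ← ih, ← hk]
      unfold bStep
      cases hg : D.get? (pairDiff p) with
      | none =>
        simp only [hg]
        rw [PySem.Dict.get?_insert_self]
      | some v =>
        by_cases hv : v < pairAbsSum p
        · simp only [hg, hv, if_pos]
          rw [PySem.Dict.get?_insert_self]
          simp [max_eq_right (le_of_lt hv)]
        · simp only [hg, hv, if_neg, not_false_iff]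
          simp [max_eq_left (by omega : pairAbsSum p ≤ v)]
    · have hfil : List.filter (fun q => pairDiff q == k) [p] = [] := by simp [hk]
      rw [hfil, List.append_nil, ← ih]
      have hne : k ≠ pairDiff p := fun h => hk h.symm
      unfold bStep
      cases hg : D.get? (pairDiff p) with
      | none =>
        simp only [hg]
        rw [PySem.Dict.get?_insert_of_ne _ _ hne]
      | some v =>
        by_cases hv : v < pairAbsSum p
        · simp only [hg, hv, if_pos]
          rw [PySem.Dict.get?_insert_of_ne _ _ hne]
        · simp only [hg, hv, if_neg, not_false_iff]

-- keys of B's dict are exactly the diffs occurring in L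
lemma mem_keys_dict (L : List (Int × Int)) (k : Int) :
    k ∈ (L.foldl bStep PySem.Dict.empty).keys ↔ k ∈ L.map pairDiff := by
  rw [← not_iff_not, ← PySem.Dict.get?_eq_none_iff_not_mem_keys, dict_char]
  constructor
  · intro h hmem
    obtain ⟨p, hp, hpk⟩ := List.mem_map.mp hmem
    have hpf : p ∈ L.filter (fun p => pairDiff p == k) := by
      rw [List.mem_filter]; exact ⟨hp, by simp [hpk]⟩
    have hnil := List.map_eq_nil_iff.mp (List.max?_eq_none_iff.mp h)
    rw [hnil] at hpf
    simp at hpf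
  · intro h
    rw [List.max?_eq_none_iff, List.map_eq_nil_iff, List.filter_eq_nil_iff]
    intro p hp hbk
    exact h (List.mem_map.mpr ⟨p, hp, by simpa using hbk⟩)

-- ===== VERDICT (by name: the statement is the Claim_ definition above) =====
theorem closestPairSum_spec : Claim_equal_closestPairSum := by
  intro arr _
  unfold Spec_closestPairSum closestPairSum closestPairSum_alt
  simp only [List.drop_one]
  set s := PySem.List.sorted arr id false with hs
  clear_value s
  clear hs
  rw [← List.foldl_map (f := fun i => (PySem.List.pyGetD s i 0, PySem.List.pyGetD s (i + 1) 0))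
      (g := aStep), map_range_pairs]
  set L := s.zip s.tail with hL
  by_cases hne : L = []
  · rw [hne]
    simp only [List.foldl_nil]
    have : (PySem.List.min? (PySem.Dict.empty : PySem.Dict Int Int).keys (fun k => k)) = none := by
      rw [PySem.List.min?_eq_none_iff]
      simp [PySem.Dict.keys_empty]
    rw [this]
  · rw [loop_char L hne]
    obtain ⟨m, hm⟩ : ∃ m, (L.map pairDiff).min? = some m := by
      cases hL' : L with
      | nil => exact absurd hL' hne
      | cons a t => exact ⟨_, by rw [List.map_cons, List.min?_cons']⟩
    have hmem : m ∈ L.map pairDiff ∧ ∀ b ∈ L.map pairDiff, m ≤ b :=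
      List.min?_eq_some_iff.mp hm
    set D := L.foldl bStep PySem.Dict.empty with hD
    -- min over the dict's keys is m
    obtain ⟨m', hm'⟩ : ∃ m', PySem.List.min? D.keys (fun k => k) = some m' := by
      cases hmin : PySem.List.min? D.keys (fun k => k) with
      | none =>
        exfalso
        have : D.keys = [] := (PySem.List.min?_eq_none_iff _ _).mp hmin
        have := (mem_keys_dict L m).mpr hmem.1
        rw [hD] at *
        simp_all
      | some v => exact ⟨v, rfl⟩
    have hm'mem : m' ∈ D.keys := PySem.List.min?_mem hm'
    have hm'min : ∀ y ∈ D.keys, m' ≤ y := by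
      intro y hy
      exact PySem.List.min?_isMin hm' y hy
    have hm'eq : m' = m := by
      have h1 : m ≤ m' := hmem.2 m' ((mem_keys_dict L m').mp hm'mem)
      have h2 : m' ≤ m := hm'min m ((mem_keys_dict L m).mpr hmem.1)
      omega
    rw [hm']
    simp [hm'eq, PySem.Dict.getD_eq_get?_getD, hD, dict_char, hm]
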